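-- pv_equiv track=rewrite | github.com/seokwns/algorithm | programmers/lv3/110 옮기기.py | solution
-- ===== SOURCE A (Python) =====
-- def solution(s):
--     answer = []
--
--     for string in s:
--         count, idx, stack = 0, 0, ""
--         while idx < len(string):
--             if string[idx] == '0' and stack[-2:] == "11":
--                 count += 1
--                 stack = stack[:-2]
--             else:
--                 stack += string[idx]
--             idx += 1
--
--         idx = stack.rfind('0')
--         if idx != -1:
--             stack = stack[:idx+1] + "110" * count + stack[idx+1:]
--         else:
--             idx = stack.find("11")
--             stack = stack[:idx] + "110" * count + stack[idx:]
--
--         answer.append(''.join(stack))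
--
--     return answer
-- ===== SOURCE B (Python) =====
-- def solution(s):
--     # Global rewriting loop ('110' -> '' repeatedly via find) instead of A's index-driven stack scan.
--     answer = []
--     for string in s:
--         count = 0
--         j = string.find('110')
--         while j != -1:
--             string = string[:j] + string[j + 3:]
--             count += 1
--             j = string.find('110')
--         i = string.rfind('0')
--         pos = i + 1 if i != -1 else string.find('11')
--         answer.append(string[:pos] + '110' * count + string[pos:])
--     return answer
-- ===== Notes on version B (the rewrite author's own statement) =====
-- stated objective: alternative
-- what changed: Replaces A's single left-to-right stack scan (popping '11' when a '0' arrives) with a global rewriting loop that repeatedly locates and deletes the first '110' substring until none remains; the insertion tail is folded into one slice pair via a computed position.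
import Mathlib
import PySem

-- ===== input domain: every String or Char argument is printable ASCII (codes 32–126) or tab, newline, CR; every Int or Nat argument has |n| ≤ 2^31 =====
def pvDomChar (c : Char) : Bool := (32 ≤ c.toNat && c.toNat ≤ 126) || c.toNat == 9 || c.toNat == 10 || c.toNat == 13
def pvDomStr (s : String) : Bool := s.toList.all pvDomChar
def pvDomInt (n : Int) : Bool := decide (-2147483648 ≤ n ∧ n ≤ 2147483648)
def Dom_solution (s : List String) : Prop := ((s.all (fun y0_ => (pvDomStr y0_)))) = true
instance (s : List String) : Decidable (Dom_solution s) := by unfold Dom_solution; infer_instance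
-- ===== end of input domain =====

-- B replaces A's one-pass stack scan by a global rewriting loop deleting the first '110'
-- substring until none remains (alternative decomposition, same values).

-- ===== PORT A =====
-- one iteration of A's while loop: state = (count, stack)
def aStep (st : Int × List Char) (c : Char) : Int × List Char :=
  if c = '0' ∧ PySem.List.slice st.2 (some (-2)) none = ['1','1'] then
    (st.1 + 1, PySem.List.slice st.2 none (some (-2)))
  else (st.1, st.2 ++ [c])

-- A's insertion tail: rfind('0') branch, else find('11') branch
def aTail (r : Int × List Char) : List Char :=
  let idx := PySem.Chars.rfind r.2 ['0']
  if idx ≠ -1 then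
    PySem.List.slice r.2 none (some (idx + 1)) ++ PySem.List.pyRepeat ['1','1','0'] r.1
      ++ PySem.List.slice r.2 (some (idx + 1)) none
  else
    let idx2 := PySem.Chars.find r.2 ['1','1']
    PySem.List.slice r.2 none (some idx2) ++ PySem.List.pyRepeat ['1','1','0'] r.1
      ++ PySem.List.slice r.2 (some idx2) none

def solution (s : List String) : List String :=
  s.foldl (fun answer string =>
    answer ++ [String.ofList (PySem.Chars.join []
      ((aTail (string.toList.foldl aStep (0, []))).map (fun c => [c])))]) []

-- ===== PORT B =====
-- termination measure for B's while loop: removing the found '110' shortens the string by 3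
theorem pvReduceLenLt (cs : List Char) (h : ¬ PySem.Chars.find cs ['1','1','0'] = -1) :
    (PySem.List.slice cs none (some (PySem.Chars.find cs ['1','1','0'])) ++
      PySem.List.slice cs (some (PySem.Chars.find cs ['1','1','0'] + 3)) none).length < cs.length := by
  have hnn : 0 ≤ PySem.Chars.find cs ['1','1','0'] := by
    rw [PySem.Chars.find_nonneg_iff]
    exact (PySem.Chars.find_ne_neg_one_iff cs ['1','1','0']).mp h
  have hspec := PySem.Chars.findFrom_natCast_spec cs ['1','1','0'] 0 (Nat.zero_le _)
    (by simpa [PySem.Chars.findFrom_zero] using h)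
  simp only [Nat.cast_zero, PySem.Chars.findFrom_zero] at hspec
  have hpre := hspec.2.1
  have hlen3 : (PySem.Chars.find cs ['1','1','0']).toNat + 3 ≤ cs.length := by
    have := hpre.length_le
    simp [List.length_drop] at this
    omega
  rw [PySem.List.slice_to _ hnn, PySem.List.slice_from _ (by omega)]
  have ht : (PySem.Chars.find cs ['1','1','0'] + 3).toNat
      = (PySem.Chars.find cs ['1','1','0']).toNat + 3 := by omega
  simp [ht]
  omega

-- B's while loop: j = string.find('110'); while j != -1: delete it, count += 1
def bReduce (cs : List Char) (count : Int) : Int × List Char :=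
  let j := PySem.Chars.find cs ['1','1','0']
  if h : j = -1 then (count, cs)
  else bReduce (PySem.List.slice cs none (some j) ++ PySem.List.slice cs (some (j + 3)) none)
    (count + 1)
termination_by cs.length
decreasing_by exact pvReduceLenLt cs h

-- B's insertion tail, with the computed position 'pos'
def bTail (count : Int) (cs : List Char) : List Char :=
  let i := PySem.Chars.rfind cs ['0']
  let pos := if i ≠ -1 then i + 1 else PySem.Chars.find cs ['1','1']
  PySem.List.slice cs none (some pos) ++ PySem.List.pyRepeat ['1','1','0'] count
    ++ PySem.List.slice cs (some pos) none

def solution_alt (s : List String) : List String :=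
  s.map (fun string =>
    let r := bReduce string.toList 0
    String.ofList (bTail r.1 r.2))

-- ===== PRECONDITION & SPEC =====
def Spec_solution (s : List String) (out : List String) : Prop := out = solution_alt s
instance (s : List String) (out : List String) : Decidable (Spec_solution s out) := by unfold Spec_solution; infer_instance

-- ===== CLAIM (what is proved, stated in full; the proofs are below) =====
def Claim_equal_solution : Prop := ∀ (s : List String), Dom_solution s → Spec_solution s (solution s)

-- ===== LEMMAS AND PROOFS =====

-- count rides along additively through A's loop; the stack is independent of it
theorem aStep_count (v : List Char) : ∀ (st : List Char) (c : Int),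
    v.foldl aStep (c, st) = (c + (v.foldl aStep (0, st)).1, (v.foldl aStep (0, st)).2) := by
  induction v with
  | nil => intro st c; simp
  | cons x xs ih =>
    intro st c
    by_cases hx : x = '0' ∧ PySem.List.slice st (some (-2)) none = ['1','1']
    · have e : ∀ c' : Int, aStep (c', st) x = (c' + 1, PySem.List.slice st none (some (-2))) := by
        intro c'; simp [aStep, hx]
      simp only [List.foldl_cons, e]
      rw [ih _ (c + 1), ih _ (0 + 1)]
      simp; omega
    · have e : ∀ c' : Int, aStep (c', st) x = (c', st ++ [x]) := by
        intro c'; simp only [aStep]; rw [if_neg hx]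
      simp only [List.foldl_cons, e]
      rw [ih (st ++ [x]) c]

-- on a '110'-free remainder A's loop only pushes
theorem aStep_no110 (v : List Char) : ∀ (st : List Char) (c : Int),
    ¬ ((['1','1','0'] : List Char) <:+: (st ++ v)) → v.foldl aStep (c, st) = (c, st ++ v) := by
  induction v with
  | nil => intro st c _; simp
  | cons x xs ih =>
    intro st c hno
    have hx : ¬ (x = '0' ∧ PySem.List.slice st (some (-2)) none = ['1','1']) := by
      rintro ⟨hx0, hsl⟩
      rw [PySem.List.slice_from_neg_ofNat st 2 (by norm_num)] at hsl
      apply hno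
      refine ⟨st.take (st.length - 2), xs, ?_⟩
      conv_rhs => rw [← List.take_append_drop (st.length - 2) st]
      subst hx0
      rw [hsl]
      simp
    simp only [List.foldl, aStep, if_neg hx]
    rw [ih (st ++ [x]) c (by simpa using hno)]
    simp

-- popping the '11' on a '0' is exactly deleting one embedded '110'
theorem aStep_splice (u v : List Char) (st : List Char) (c : Int) :
    (u ++ ['1','1','0'] ++ v).foldl aStep (c, st)
      = (((u ++ v).foldl aStep (c, st)).1 + 1, ((u ++ v).foldl aStep (c, st)).2) := by
  rw [List.foldl_append, List.foldl_append, List.foldl_append]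
  set p := u.foldl aStep (c, st) with hp
  have h1 : (['1','1','0'] : List Char).foldl aStep p = (p.1 + 1, p.2) := by
    have e1 : aStep p '1' = (p.1, p.2 ++ ['1']) := by simp [aStep]
    have e2 : aStep (p.1, p.2 ++ ['1']) '1' = (p.1, p.2 ++ ['1','1']) := by simp [aStep]
    have e3 : aStep (p.1, p.2 ++ ['1','1']) '0' = (p.1 + 1, p.2) := by
      have hsl : PySem.List.slice (p.2 ++ ['1','1']) (some (-2)) none = ['1','1'] := by
        rw [PySem.List.slice_from_neg_ofNat _ 2 (by norm_num)]
        simp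
      have hsl2 : PySem.List.slice (p.2 ++ ['1','1']) none (some (-2)) = p.2 := by
        rw [PySem.List.slice_to_neg_ofNat _ 2 (by norm_num)]
        simp
      simp [aStep, hsl, hsl2]
    simp [List.foldl, e1, e2, e3]
  rw [h1]
  rw [aStep_count v p.2 (p.1 + 1), aStep_count v p.2 p.1]
  simp; omega

-- B's rewriting loop computes A's stack and count
theorem bReduce_eq (n : Nat) : ∀ (cs : List Char), cs.length ≤ n → ∀ (c : Int),
    bReduce cs c = (c + (cs.foldl aStep (0, [])).1, (cs.foldl aStep (0, [])).2) := by
  induction n with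
  | zero =>
    intro cs hlen c
    have : cs = [] := List.eq_nil_of_length_eq_zero (by omega)
    subst this
    rw [bReduce]
    norm_num [show PySem.Chars.find ([] : List Char) ['1','1','0'] = -1 by decide]
  | succ m ih =>
    intro cs hlen c
    by_cases hfind : PySem.Chars.find cs ['1','1','0'] = -1
    · rw [bReduce]
      simp only [hfind, dif_pos]
      have hno : ¬ ((['1','1','0'] : List Char) <:+: cs) :=
        (PySem.Chars.find_eq_neg_one_iff cs ['1','1','0']).mp hfind
      rw [aStep_no110 cs [] 0 (by simpa using hno)]
      simp
    · -- decompose cs at the first occurrence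
      set j := PySem.Chars.find cs ['1','1','0'] with hj
      have hnn : 0 ≤ j := by
        rw [hj, PySem.Chars.find_nonneg_iff]
        exact (PySem.Chars.find_ne_neg_one_iff cs ['1','1','0']).mp hfind
      have hspec := PySem.Chars.findFrom_natCast_spec cs ['1','1','0'] 0 (Nat.zero_le _)
        (by simpa [PySem.Chars.findFrom_zero] using hfind)
      simp only [Nat.cast_zero, PySem.Chars.findFrom_zero] at hspec
      have hpre : (['1','1','0'] : List Char) <+: cs.drop j.toNat := hspec.2.1
      obtain ⟨t, ht⟩ := hpre
      have hlen3 : j.toNat + 3 ≤ cs.length := by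
        have := congrArg List.length ht
        simp [List.length_drop] at this
        omega
      have hu : PySem.List.slice cs none (some j) = cs.take j.toNat :=
        PySem.List.slice_to _ hnn
      have hv : PySem.List.slice cs (some (j + 3)) none = cs.drop (j.toNat + 3) := by
        rw [PySem.List.slice_from _ (by omega)]
        congr 1
        omega
      have hdecomp : cs = cs.take j.toNat ++ ['1','1','0'] ++ t := by
        conv_lhs => rw [← List.take_append_drop j.toNat cs]
        rw [← ht]
        simp
      have htv : cs.drop (j.toNat + 3) = t := by
        rw [← List.drop_drop, ← ht]
        simp
      rw [bReduce]
      simp only [← hj, dif_neg hfind]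
      have hlt : (PySem.List.slice cs none (some j) ++ PySem.List.slice cs (some (j + 3)) none).length ≤ m := by
        have := pvReduceLenLt cs (by rw [← hj]; exact hfind)
        rw [← hj] at this
        omega
      rw [ih _ hlt (c + 1)]
      rw [hu, hv, htv]
      conv_rhs => rw [hdecomp]
      rw [aStep_splice (cs.take j.toNat) t [] 0]
      simp
      omega

-- the two insertion tails are the same slices
theorem tail_eq (r : Int × List Char) : aTail r = bTail r.1 r.2 := by
  unfold aTail bTail
  by_cases h : PySem.Chars.rfind r.2 ['0'] ≠ -1 <;> simp [h]

-- ===== VERDICT (by name: the statement is the Claim_ definition above) =====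
theorem solution_spec : Claim_equal_solution := by
  intro s _
  unfold Spec_solution solution solution_alt
  rw [PySem.List.foldl_append_singleton_eq_map]
  apply List.map_congr_left
  intro str _
  rw [PySem.Chars.join_nil_singletons]
  rw [tail_eq]
  rw [bReduce_eq str.toList.length str.toList le_rfl 0]
  simp
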